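-- pv_equiv track=rewrite | github.com/VolodyaEsk/hokodo-task | exercises/exercise6.py | get_new_alphabet
-- ===== SOURCE A (Python) =====
-- def get_new_alphabet(hint):
--     new_alphabet = hint.pop(0)
--
--     for order in hint:
--         for index, letter in enumerate(order):
--             if letter not in new_alphabet:
--                 if index == 0:
--                     new_alphabet.insert(index, letter)
--                 else:
--                     previous_index = index - 1
--                     previous_letter = order[previous_index]
--                     index_to_insert = new_alphabet.index(previous_letter) + 1
--                     new_alphabet.insert(index_to_insert, letter)
--
--     return new_alphabet
-- ===== SOURCE B (Python) =====
-- def get_new_alphabet(hint):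
--     # Linked-list-with-hashmap re-implementation: O(total length) instead of
--     # repeated O(n) membership / .index / .insert on the growing list.
--     # Like A, consumes hint[0] via hint.pop(0) (same in-place mutation).
--     row0 = hint.pop(0)
--     letters = list(row0)                      # node id -> letter
--     nxt = list(range(1, len(row0))) + ([None] if row0 else [])   # node -> successor (None = end)
--     head = 0 if row0 else None
--     first = {}                                # letter -> node of its first occurrence
--     for i, ch in enumerate(row0):
--         if ch not in first:
--             first[ch] = i
--     for order in hint:
--         prev = None                           # node of the previous letter of this order
--         for letter in order:
--             if letter in first:
--                 prev = first[letter]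
--             else:
--                 node = len(letters)
--                 letters.append(letter)
--                 first[letter] = node
--                 if prev is None:              # first letter of the order: new front
--                     nxt.append(head)
--                     head = node
--                 else:                         # splice right after prev
--                     nxt.append(nxt[prev])
--                     nxt[prev] = node
--                 prev = node
--     out = []
--     n = head
--     while n is not None:
--         out.append(letters[n])
--         n = nxt[n]
--     return out
-- ===== Notes on version B (the rewrite author's own statement) =====
-- stated objective: faster
-- what changed: Replaces the list-based loop (membership test, .index scan and .insert shift on the growing alphabet, each O(n)) with a singly linked list over integer node ids plus a hashmap letter->first-occurrence node, so each hint letter is located and spliced in O(1) and the result is read off by one walk.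
import Mathlib
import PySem

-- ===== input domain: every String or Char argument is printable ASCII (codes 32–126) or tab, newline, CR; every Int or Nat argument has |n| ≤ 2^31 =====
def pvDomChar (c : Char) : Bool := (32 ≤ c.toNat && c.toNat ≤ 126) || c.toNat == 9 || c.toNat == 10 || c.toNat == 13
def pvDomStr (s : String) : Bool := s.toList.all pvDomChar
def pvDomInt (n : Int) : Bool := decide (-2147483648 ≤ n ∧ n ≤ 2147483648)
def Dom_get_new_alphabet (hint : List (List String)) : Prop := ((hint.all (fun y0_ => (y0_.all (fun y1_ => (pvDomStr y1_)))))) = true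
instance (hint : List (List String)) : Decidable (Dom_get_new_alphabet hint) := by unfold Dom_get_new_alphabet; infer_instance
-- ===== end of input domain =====

-- B replaces A's list scans (membership / .index / .insert, each O(alphabet)) by a linked
-- list over node ids plus a letter→node map, splicing each new letter in O(1).
-- Both A and B pop hint[0] in place (same mutation); the theorems are about the RETURN value.

-- ===== PORT A =====
-- body of A's inner 'for index, letter in enumerate(order)' loop
def pvStepA (order : List String) (na : List String) (p : Int × String) : List String :=
  let index := p.1
  let letter := p.2
  if letter ∈ na then na
  else if index == 0 then PySem.List.insert na index letter
  else
    let previous_index := index - 1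
    match PySem.List.pyGet? order previous_index with
    | none => na      -- unreachable: 0 ≤ index-1 < len(order)
    | some previous_letter =>
      match PySem.List.index? na previous_letter with
      | none => na    -- unreachable ValueError: previous_letter is always in na
      | some i => PySem.List.insert na ((i : Int) + 1) letter

def get_new_alphabet (hint : List (List String)) : List String :=
  match PySem.List.pop? hint 0 with
  | none => []      -- hint == []: Python raises IndexError; excluded by Pre_
  | some (new_alphabet0, rest) =>
    rest.foldl (fun new_alphabet order =>
      (PySem.List.enumerate order).foldl (pvStepA order) new_alphabet) new_alphabet0

-- ===== PORT B =====
structure pvBState where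
  letters : List String            -- node id -> letter
  nxt : List (Option Nat)          -- node id -> successor node (none = end)
  head : Option Nat
  first : PySem.Dict String Nat    -- letter -> node of its first occurrence
deriving Repr, DecidableEq

-- body of Source B's inner 'for letter in order' loop; the state carries prev
def pvStepB (st : pvBState × Option Nat) (letter : String) : pvBState × Option Nat :=
  let s := st.1
  let prev := st.2
  match s.first.get? letter with
  | some n => (s, some n)
  | none =>
    let node := s.letters.length
    match prev with
    | none =>         -- first letter of the order: new front
      ({ letters := s.letters ++ [letter], nxt := s.nxt ++ [s.head],
         head := some node, first := s.first.insert letter node }, some node)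
    | some p =>       -- splice right after prev: nxt.append(nxt[p]); nxt[p] = node
      ({ letters := s.letters ++ [letter],
         nxt := (s.nxt ++ [s.nxt.getD p none]).set p (some node),
         head := s.head, first := s.first.insert letter node }, some node)

-- Source B's final 'while n is not None' walk; fuel = number of nodes (the walk provably
-- ends within that many steps: pvWalk_links below)
def pvWalk (letters : List String) (nxt : List (Option Nat)) : Option Nat → Nat → List String
  | none, _ => []
  | some _, 0 => []
  | some n, Nat.succ fuel => letters.getD n "" :: pvWalk letters nxt (nxt.getD n none) fuel

def get_new_alphabet_alt (hint : List (List String)) : List String :=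
  match PySem.List.pop? hint 0 with
  | none => []      -- hint == []: Python raises IndexError; excluded by Pre_
  | some (row0, rest) =>
    let letters := row0
    -- nxt = list(range(1, len(row0))) + ([None] if row0 else [])
    let nxt : List (Option Nat) :=
      (List.range row0.length).tail.map some ++ (if row0.isEmpty then [] else [none])
    let head : Option Nat := if row0.isEmpty then none else some 0
    -- for i, ch in enumerate(row0): if ch not in first: first[ch] = i
    let first : PySem.Dict String Nat :=
      row0.zipIdx.foldl (fun d q => if d.contains q.1 then d else d.insert q.1 q.2) PySem.Dict.empty
    let s : pvBState :=
      rest.foldl (fun s order => (order.foldl pvStepB (s, (none : Option Nat))).1)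
        { letters := letters, nxt := nxt, head := head, first := first }
    pvWalk s.letters s.nxt s.head s.letters.length

-- ===== PRECONDITION & SPEC =====
-- hint.pop(0) raises IndexError on the empty list (in A and in B alike); only that input is excluded
def Pre_get_new_alphabet (hint : List (List String)) : Prop := hint ≠ []
instance (hint : List (List String)) : Decidable (Pre_get_new_alphabet hint) := by unfold Pre_get_new_alphabet; infer_instance
def pvWitness_get_new_alphabet : List (List String) := [["b", "a"], ["a", "c"]]

def Spec_get_new_alphabet (hint : List (List String)) (out : List String) : Prop := out = get_new_alphabet_alt hint
instance (hint : List (List String)) (out : List String) : Decidable (Spec_get_new_alphabet hint out) := by unfold Spec_get_new_alphabet; infer_instance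

-- ===== CLAIM (what is proved, stated in full; the proofs are below) =====
def Claim_equal_get_new_alphabet : Prop := ∀ (hint : List (List String)), Dom_get_new_alphabet hint → Pre_get_new_alphabet hint → Spec_get_new_alphabet hint (get_new_alphabet hint)

-- ===== LEMMAS AND PROOFS =====

-- the linked list rooted at h spells out the node sequence ns
def pvLinks (nxt : List (Option Nat)) : Option Nat → List Nat → Prop
  | h, [] => h = none
  | h, n :: ns => h = some n ∧ pvLinks nxt (nxt.getD n none) ns

-- the B-state s represents A's alphabet list alph through the node sequence ns
structure pvRep (s : pvBState) (ns : List Nat) (alph : List String) : Prop where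
  nodup : ns.Nodup
  bound : ∀ n ∈ ns, n < s.letters.length
  lenNxt : s.nxt.length = s.letters.length
  links : pvLinks s.nxt s.head ns
  alphEq : alph = ns.map (fun n => s.letters.getD n "")
  firstEq : ∀ l, s.first.get? l = (ns.filter (fun n => s.letters.getD n "" == l)).head?

-- prev holds the node recorded for the last letter of the processed prefix of the order
def pvPrevOK (s : pvBState) (pre : List String) (prev : Option Nat) : Prop :=
  match pre.getLast? with
  | none => prev = none
  | some pl => prev = s.first.get? pl ∧ prev.isSome

theorem pvWalk_links (letters : List String) (nxt : List (Option Nat))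
    (ns : List Nat) : ∀ (h : Option Nat) (fuel : Nat), pvLinks nxt h ns → ns.length ≤ fuel →
    pvWalk letters nxt h fuel = ns.map (fun n => letters.getD n "") := by
  induction ns with
  | nil => intro h fuel hl _; cases hl; cases fuel <;> rfl
  | cons n ns ih =>
    intro h fuel hl hf
    obtain ⟨rfl, hl2⟩ := hl
    cases fuel with
    | zero => simp at hf
    | succ fuel =>
      simp only [pvWalk, List.map_cons]
      exact congrArg _ (ih _ fuel hl2 (by simpa using hf))

theorem pv_len_le (ns : List Nat) (N : Nat) (h1 : ns.Nodup) (h2 : ∀ n ∈ ns, n < N) :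
    ns.length ≤ N := by
  have : ns.toFinset ⊆ Finset.range N := by
    intro x hx; simp only [Finset.mem_range]; exact h2 x (List.mem_toFinset.mp hx)
  calc ns.length = ns.toFinset.card := (List.toFinset_card_of_nodup h1).symm
    _ ≤ (Finset.range N).card := Finset.card_le_card this
    _ = N := Finset.card_range N

theorem pvLinks_congr (nxt nxt' : List (Option Nat)) (ns : List Nat)
    (hsame : ∀ n ∈ ns, nxt'.getD n none = nxt.getD n none) :
    ∀ h, pvLinks nxt h ns → pvLinks nxt' h ns := by
  induction ns with
  | nil => intro h hl; exact hl
  | cons n ns ih =>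
    intro h hl
    obtain ⟨rfl, hl2⟩ := hl
    refine ⟨rfl, ?_⟩
    rw [hsame n List.mem_cons_self]
    exact ih (fun m hm => hsame m (List.mem_cons_of_mem _ hm)) _ hl2

-- membership in alph through the first map
theorem pv_first_none_iff (s : pvBState) (ns : List Nat) (alph : List String)
    (hr : pvRep s ns alph) (l : String) :
    s.first.get? l = none ↔ l ∉ alph := by
  rw [hr.firstEq l, hr.alphEq]
  simp

-- appended letters do not change the letter of an old node
theorem pv_letterAt_append (letters : List String) (t : List String) (n : Nat)
    (h : n < letters.length) : (letters ++ t).getD n "" = letters.getD n "" :=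
  List.getD_append _ _ _ _ h

theorem pv_letterAt_new (letters : List String) (x : String) :
    (letters ++ [x]).getD letters.length "" = x := by
  simp [List.getD]

-- ===== the three step lemmas =====

theorem pvStepB_skip (s : pvBState) (prev : Option Nat) (x : String) (n : Nat)
    (hx : s.first.get? x = some n) : pvStepB (s, prev) x = (s, some n) := by
  simp [pvStepB, hx]

-- letters applied to old nodes are unchanged by appending; in map and filter form
theorem pv_map_pres (letters : List String) (t : List String) (ns : List Nat)
    (hb : ∀ n ∈ ns, n < letters.length) :
    ns.map (fun n => (letters ++ t).getD n "") = ns.map (fun n => letters.getD n "") :=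
  List.map_congr_left (fun n hn => pv_letterAt_append _ _ _ (hb n hn))

theorem pv_filter_pres (letters : List String) (t : List String) (ns : List Nat)
    (hb : ∀ n ∈ ns, n < letters.length) (l : String) :
    ns.filter (fun n => (letters ++ t).getD n "" == l) = ns.filter (fun n => letters.getD n "" == l) :=
  List.filter_congr (fun n hn => by rw [pv_letterAt_append _ _ _ (hb n hn)])

theorem pv_getD_append_self (nxt : List (Option Nat)) (v : Option Nat) :
    (nxt ++ [v]).getD nxt.length none = v := by
  simp [List.getD]

theorem pvRep_front (s : pvBState) (ns : List Nat) (alph : List String)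
    (hr : pvRep s ns alph) (x : String) (hx : x ∉ alph) :
    pvRep { letters := s.letters ++ [x], nxt := s.nxt ++ [s.head],
            head := some s.letters.length, first := s.first.insert x s.letters.length }
      (s.letters.length :: ns) (x :: alph) := by
  have hNmem : s.letters.length ∉ ns := fun h => Nat.lt_irrefl _ (hr.bound _ h)
  refine ⟨?_, ?_, ?_, ?_, ?_, ?_⟩
  · exact List.nodup_cons.mpr ⟨hNmem, hr.nodup⟩
  · intro n hn
    simp only [List.length_append, List.length_cons, List.length_nil]
    rcases List.mem_cons.mp hn with rfl | h
    · omega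
    · have := hr.bound n h; omega
  · simp [hr.lenNxt]
  · refine ⟨rfl, ?_⟩
    simp only
    rw [← hr.lenNxt, pv_getD_append_self]
    exact pvLinks_congr _ _ ns
      (fun n hn => List.getD_append _ _ _ _ (hr.lenNxt ▸ hr.bound n hn)) _ hr.links
  · simp only [List.map_cons, pv_letterAt_new, pv_map_pres _ _ _ hr.bound]
    exact congrArg _ hr.alphEq
  · intro l
    simp only [PySem.Dict.get?_insert, List.filter_cons, pv_letterAt_new]
    by_cases hl : l = x
    · subst hl
      simp
    · rw [if_neg hl, if_neg (by simpa [beq_iff_eq] using Ne.symm hl),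
          pv_filter_pres _ _ _ hr.bound, hr.firstEq]

theorem pv_getD_set_self (l : List (Option Nat)) (p : Nat) (hp : p < l.length) (v : Option Nat) :
    (l.set p v).getD p none = v := by
  simp [List.getD, List.getElem?_set_self hp]

theorem pv_getD_splice_other (nxt : List (Option Nat)) (w v : Option Nat) (n p : Nat)
    (hn : n < nxt.length) (hne : n ≠ p) :
    ((nxt ++ [w]).set p v).getD n none = nxt.getD n none := by
  rw [List.getD, List.getElem?_set_ne (Ne.symm hne), ← List.getD, List.getD_append _ _ _ _ hn]

theorem pv_getD_splice_new (nxt : List (Option Nat)) (w v : Option Nat) (p : Nat)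
    (hp : p < nxt.length) :
    ((nxt ++ [w]).set p v).getD nxt.length none = w := by
  rw [List.getD, List.getElem?_set_ne (Nat.ne_of_lt hp), ← List.getD, pv_getD_append_self]

theorem pvLinks_splice (nxt : List (Option Nat)) (p : Nat) (hp : p < nxt.length) :
    ∀ (pre suf : List Nat) (h : Option Nat),
    pvLinks nxt h (pre ++ p :: suf) → (pre ++ p :: suf).Nodup →
    (∀ n ∈ pre ++ p :: suf, n < nxt.length) →
    pvLinks ((nxt ++ [nxt.getD p none]).set p (some nxt.length)) h (pre ++ p :: nxt.length :: suf) := by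
  intro pre
  induction pre with
  | nil =>
    intro suf h hl hnd hb
    obtain ⟨rfl, hl2⟩ := hl
    refine ⟨rfl, ?_, ?_⟩
    · exact pv_getD_set_self _ _ (by simp; omega) _
    · rw [pv_getD_splice_new _ _ _ _ hp]
      refine pvLinks_congr _ _ suf (fun n hn => ?_) _ hl2
      have hnp : n ≠ p := fun h => ((List.nodup_cons.mp hnd).1 (h ▸ hn))
      exact pv_getD_splice_other _ _ _ _ _ (hb n (by simp [hn])) hnp
  | cons q pre ih =>
    intro suf h hl hnd hb
    obtain ⟨rfl, hl2⟩ := hl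
    have hqp : q ≠ p := by
      intro h; exact (List.nodup_cons.mp hnd).1 (h ▸ List.mem_append_right _ List.mem_cons_self)
    refine ⟨rfl, ?_⟩
    rw [pv_getD_splice_other _ _ _ _ _ (hb q List.mem_cons_self) hqp]
    exact ih suf _ hl2 (List.nodup_cons.mp hnd).2 (fun n hn => hb n (List.mem_cons_of_mem _ hn))

theorem pvRep_mid (s : pvBState) (ns : List Nat) (alph : List String)
    (hr : pvRep s ns alph) (x : String) (hx : x ∉ alph)
    (pl : String) (p : Nat) (hp : s.first.get? pl = some p) :
    ∃ i, PySem.List.index? alph pl = some i ∧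
      ∃ ns', pvRep { letters := s.letters ++ [x],
                     nxt := (s.nxt ++ [s.nxt.getD p none]).set p (some s.letters.length),
                     head := s.head, first := s.first.insert x s.letters.length }
        ns' (PySem.List.insert alph ((i : Int) + 1) x) := by
  -- decompose ns around the first node carrying the letter pl
  have hfe := (hr.firstEq pl).symm.trans hp
  obtain ⟨flt, hflt⟩ : ∃ t, ns.filter (fun n => s.letters.getD n "" == pl) = p :: t := by
    cases hh : ns.filter (fun n => s.letters.getD n "" == pl) with
    | nil => rw [hh] at hfe; exact absurd hfe (by simp)
    | cons a t => rw [hh] at hfe; simp at hfe; exact ⟨t, by rw [hfe]⟩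
  obtain ⟨pre, suf, hns, hpre, hpp, -⟩ := List.filter_eq_cons_iff.mp hflt
  have hpl : s.letters.getD p "" = pl := by simpa using hpp
  have hprel : ∀ n ∈ pre, s.letters.getD n "" ≠ pl := fun n hn => by
    have := hpre n hn; simpa using this
  -- alph decomposed accordingly
  set f : Nat → String := fun n => s.letters.getD n "" with hf
  have halph : alph = pre.map f ++ pl :: suf.map f := by
    rw [hr.alphEq, hns]
    simp only [List.map_append, List.map_cons]
    rw [hpl]
  -- the index A computes
  refine ⟨pre.length, ?_, ?_⟩
  · rw [PySem.List.index?_eq_some_iff alph pl pre.length]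
    refine ⟨pre.map f, suf.map f, halph, by simp, ?_⟩
    intro hmem
    obtain ⟨n, hn, hfn⟩ := List.mem_map.mp hmem
    exact hprel n hn hfn
  -- the new node sequence
  set N := s.letters.length with hN
  refine ⟨pre ++ p :: N :: suf, ?_⟩
  have hperm : (pre ++ p :: N :: suf).Perm (N :: ns) := by
    rw [hns, show pre ++ p :: N :: suf = (pre ++ [p]) ++ N :: suf by simp,
        show pre ++ p :: suf = (pre ++ [p]) ++ suf by simp]
    exact List.perm_middle
  have hNmem : N ∉ ns := fun h => Nat.lt_irrefl _ (hr.bound _ h)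
  rw [hN] at *
  have hxns : ∀ n ∈ ns, s.letters.getD n "" ≠ x := by
    intro n hn hfx
    apply hx
    rw [hr.alphEq, ← hfx]
    exact List.mem_map_of_mem hn
  -- the inserted list A produces
  have hins : PySem.List.insert alph ((pre.length : Int) + 1) x
      = pre.map f ++ pl :: x :: suf.map f := by
    have h1 : ((pre.length : Int) + 1) = ((pre.length + 1 : Nat) : Int) := by push_cast; ring
    have hlen : pre.length + 1 ≤ alph.length := by rw [halph]; simp
    rw [h1, PySem.List.insert_natCast alph (pre.length + 1) x hlen, halph]
    have h2 : (pre.map f ++ pl :: suf.map f) = (pre.map f ++ [pl]) ++ suf.map f := by simp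
    rw [h2, List.take_left' (by simp), List.drop_left' (by simp)]
    simp
  rw [hins]
  -- bounds
  have hbnd := hr.bound
  have hbnd' : ∀ n ∈ pre ++ p :: suf, n < s.nxt.length := by
    rw [hr.lenNxt, ← hns]; exact hbnd
  have hpN : p < N := hr.bound p (hns ▸ List.mem_append_right _ List.mem_cons_self)
  refine ⟨?_, ?_, ?_, ?_, ?_, ?_⟩
  · exact hperm.nodup_iff.mpr (List.nodup_cons.mpr ⟨hNmem, hr.nodup⟩)
  · intro n hn
    simp only [List.length_append, List.length_cons, List.length_nil]
    rcases List.mem_cons.mp (hperm.mem_iff.mp hn) with rfl | h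
    · omega
    · have := hr.bound n h; omega
  · simp [hr.lenNxt]
  · have := pvLinks_splice s.nxt p (by rw [hr.lenNxt]; exact hpN) pre suf s.head
      (hns ▸ hr.links) (hns ▸ hr.nodup) hbnd'
    simpa [hr.lenNxt] using this
  · -- letters of the new sequence
    simp only [List.map_append, List.map_cons]
    have hpreb : ∀ n ∈ pre, n < s.letters.length := fun n hn =>
      hbnd n (hns ▸ List.mem_append_left _ hn)
    have hsufb : ∀ n ∈ suf, n < s.letters.length := fun n hn =>
      hbnd n (hns ▸ List.mem_append_right _ (List.mem_cons_of_mem _ hn))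
    rw [pv_map_pres _ _ _ hpreb, pv_map_pres _ _ _ hsufb,
        pv_letterAt_append _ _ _ hpN, hpl, pv_letterAt_new]
  · intro l
    have hpreb : ∀ n ∈ pre, n < s.letters.length := fun n hn =>
      hbnd n (hns ▸ List.mem_append_left _ hn)
    have hsufb : ∀ n ∈ suf, n < s.letters.length := fun n hn =>
      hbnd n (hns ▸ List.mem_append_right _ (List.mem_cons_of_mem _ hn))
    simp only [PySem.Dict.get?_insert, List.filter_append, List.filter_cons,
      pv_letterAt_new, pv_letterAt_append _ _ _ hpN,
      pv_filter_pres _ _ _ hpreb, pv_filter_pres _ _ _ hsufb]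
    by_cases hl : l = x
    · subst hl
      rw [if_pos rfl]
      have hfpre : pre.filter (fun n => s.letters.getD n "" == l) = [] :=
        List.filter_eq_nil_iff.mpr (fun n hn => by
          simp only [beq_iff_eq]
          exact hxns n (hns ▸ List.mem_append_left _ hn))
      have hfsuf : (s.letters.getD p "" == l) = false := by
        simp only [beq_eq_false_iff_ne, hpl]
        intro h
        have hmem : pl ∈ alph := by
          rw [halph]; exact List.mem_append_right _ List.mem_cons_self
        rw [h] at hmem; exact hx hmem
      rw [hfpre, hfsuf]
      simp
    · rw [if_neg hl, hr.firstEq l, hns, List.filter_append, List.filter_cons]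
      have : (x == l) = false := by simp [beq_eq_false_iff_ne]; exact fun h => hl h.symm
      rw [this]
      simp

-- ===== inner and outer loop equivalence =====

theorem pv_inner (suf : List String) :
    ∀ (pre : List String) (s : pvBState) (ns : List Nat) (alph : List String) (prev : Option Nat),
    pvRep s ns alph → pvPrevOK s pre prev →
    ∃ ns', pvRep (suf.foldl pvStepB (s, prev)).1 ns'
      ((PySem.List.enumerate suf ((pre.length : Int))).foldl (pvStepA (pre ++ suf)) alph) := by
  induction suf with
  | nil =>
    intro pre s ns alph prev hr _
    exact ⟨ns, hr⟩
  | cons x t ih =>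
    intro pre s ns alph prev hr hok
    rw [PySem.List.enumerate_cons, List.foldl_cons, List.foldl_cons]
    have hshift : ((pre.length : Int) + 1) = (((pre ++ [x]).length : Nat) : Int) := by
      simp
    have hord : pre ++ x :: t = (pre ++ [x]) ++ t := by simp
    cases hfx : s.first.get? x with
    | some n =>
      -- letter already present: A skips, B records prev = its first node
      have hxmem : x ∈ alph := by
        by_contra hc
        rw [(pv_first_none_iff s ns alph hr x).mpr hc] at hfx
        cases hfx
      have hA : pvStepA (pre ++ x :: t) alph ((pre.length : Int), x) = alph := by
        simp [pvStepA, hxmem]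
      rw [hA, pvStepB_skip s prev x n hfx]
      have hok' : pvPrevOK s (pre ++ [x]) (some n) := by
        simp only [pvPrevOK, List.getLast?_concat]
        exact ⟨hfx.symm, rfl⟩
      have := ih (pre ++ [x]) s ns alph (some n) hr hok'
      rw [← hshift, ← hord] at this
      exact this
    | none =>
      have hx : x ∉ alph := (pv_first_none_iff s ns alph hr x).mp hfx
      cases pre with
      | nil =>
        -- index == 0: insert at the front
        have hprev : prev = none := by simpa [pvPrevOK] using hok
        subst hprev
        have hA : pvStepA ([] ++ x :: t) alph (((List.length ([] : List String)) : Int), x)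
            = x :: alph := by
          simp [pvStepA, hx, PySem.List.insert_zero]
        have hB : pvStepB (s, none) x
            = ({ letters := s.letters ++ [x], nxt := s.nxt ++ [s.head],
                 head := some s.letters.length, first := s.first.insert x s.letters.length },
               some s.letters.length) := by
          simp [pvStepB, hfx]
        rw [hA, hB]
        have hr' := pvRep_front s ns alph hr x hx
        have hok' : pvPrevOK { letters := s.letters ++ [x], nxt := s.nxt ++ [s.head],
                               head := some s.letters.length,
                               first := s.first.insert x s.letters.length }
            ([] ++ [x]) (some s.letters.length) := by
          simp only [pvPrevOK, List.nil_append, List.getLast?_singleton]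
          constructor
          · rw [PySem.Dict.get?_insert]
            simp
          · rfl
        have := ih ([] ++ [x]) _ _ _ _ hr' hok'
        rw [← hshift, ← hord] at this
        exact this
      | cons q pre' =>
        -- index ≥ 1: splice after the first node of the previous letter
        obtain ⟨pl, hpl⟩ : ∃ pl, (q :: pre').getLast? = some pl := by
          cases h : (q :: pre').getLast? with
          | none => rw [List.getLast?_eq_none_iff] at h; cases h
          | some a => exact ⟨a, rfl⟩
        rw [pvPrevOK, hpl] at hok
        obtain ⟨hprev, hsome⟩ := hok
        obtain ⟨p, hp⟩ : ∃ p, s.first.get? pl = some p := by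
          cases h : s.first.get? pl with
          | none => rw [hprev, h] at hsome; cases hsome
          | some a => exact ⟨a, rfl⟩
        rw [hp] at hprev
        subst hprev
        -- A's lookups
        have hk0 : ((((q :: pre').length : Nat) : Int) == 0) = false := by
          simp
          omega
        have hget : PySem.List.pyGet? ((q :: pre') ++ x :: t) (((q :: pre').length : Int) - 1)
            = some pl := by
          have h1 : (((q :: pre').length : Int) - 1) = ((((q :: pre').length - 1 : Nat)) : Int) := by
            simp
          rw [h1, PySem.List.pyGet?_natCast, List.getElem?_append_left (by simp)]
          rw [← List.getLast?_eq_getElem?]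
          exact hpl
        obtain ⟨i, hidx, ns', hrep⟩ := pvRep_mid s ns alph hr x hx pl p hp
        have hA : pvStepA ((q :: pre') ++ x :: t) alph (((q :: pre').length : Int), x)
            = PySem.List.insert alph ((i : Int) + 1) x := by
          simp only [pvStepA, if_neg (by simpa using hx), hk0, Bool.false_eq_true, if_false,
            hget, hidx]
        have hB : pvStepB (s, some p) x
            = ({ letters := s.letters ++ [x],
                 nxt := (s.nxt ++ [s.nxt.getD p none]).set p (some s.letters.length),
                 head := s.head, first := s.first.insert x s.letters.length },
               some s.letters.length) := by
          simp [pvStepB, hfx]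
        rw [hA, hB]
        have hok' : pvPrevOK { letters := s.letters ++ [x],
                               nxt := (s.nxt ++ [s.nxt.getD p none]).set p (some s.letters.length),
                               head := s.head,
                               first := s.first.insert x s.letters.length }
            ((q :: pre') ++ [x]) (some s.letters.length) := by
          simp only [pvPrevOK, List.getLast?_concat]
          constructor
          · rw [PySem.Dict.get?_insert]
            simp
          · rfl
        have := ih ((q :: pre') ++ [x]) _ ns' _ _ hrep hok'
        rw [← hshift, ← hord] at this
        exact this

theorem pv_outer (rest : List (List String)) :
    ∀ (s : pvBState) (ns : List Nat) (alph : List String), pvRep s ns alph →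
    ∃ ns', pvRep (rest.foldl (fun s order => (order.foldl pvStepB (s, (none : Option Nat))).1) s) ns'
      (rest.foldl (fun na order => (PySem.List.enumerate order).foldl (pvStepA order) na) alph) := by
  induction rest with
  | nil => intro s ns alph hr; exact ⟨ns, hr⟩
  | cons order rest ih =>
    intro s ns alph hr
    have h1 := pv_inner order [] s ns alph none hr (by simp [pvPrevOK])
    obtain ⟨ns1, hr1⟩ := h1
    simpa using ih _ ns1 _ hr1

-- ===== the initial state =====

theorem pv_init_getD (row0 : List String) (m : Nat) (hm : m < row0.length) :
    ((List.range row0.length).tail.map some ++ (if row0.isEmpty then [] else [none])).getD m none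
      = if m + 1 < row0.length then some (m + 1) else none := by
  have hne : row0.isEmpty = false := by
    cases row0
    · simp at hm
    · rfl
  rw [hne, List.tail_range]
  by_cases h : m + 1 < row0.length
  · rw [if_pos h, List.getD, List.getElem?_append_left (by simp; omega), List.getElem?_map,
        List.getElem?_range' (by omega)]
    simp
    omega
  · rw [if_neg h, List.getD, List.getElem?_append_right (by simp; omega)]
    simp

theorem pv_init_links (row0 : List String) :
    ∀ (d k : Nat), k + d = row0.length →
    pvLinks ((List.range row0.length).tail.map some ++ (if row0.isEmpty then [] else [none]))
      (if k < row0.length then some k else none) (List.range' k d) := by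
  intro d
  induction d with
  | zero =>
    intro k hk
    rw [if_neg (show ¬ k < row0.length by omega)]
    rfl
  | succ d ih =>
    intro k hk
    have hkn : k < row0.length := by omega
    rw [if_pos hkn, List.range'_succ]
    refine ⟨rfl, ?_⟩
    rw [pv_init_getD row0 k hkn]
    have := ih (k + 1) (by omega)
    rcases Nat.lt_or_ge (k + 1) row0.length with h | h
    · rw [if_pos h]
      rwa [if_pos h] at this
    · rw [if_neg (show ¬ k + 1 < row0.length by omega)] at this
      rw [if_neg (show ¬ k + 1 < row0.length by omega)]
      exact this

theorem pv_init_first (row0 : List String) (l : String) :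
    (row0.zipIdx.foldl (fun d q => if d.contains q.1 then d else d.insert q.1 q.2)
        (PySem.Dict.empty : PySem.Dict String Nat)).get? l
      = ((List.range row0.length).filter (fun k => row0.getD k "" == l)).head? := by
  induction row0 using List.reverseRecOn with
  | nil => simp [PySem.Dict.get?_empty]
  | append_singleton xs x ih =>
    rw [List.zipIdx_append, List.zipIdx_singleton, List.foldl_append, List.foldl_cons,
        List.foldl_nil, List.length_append, List.length_singleton, List.range_succ,
        List.filter_append]
    have hcong : ∀ (l' : String), (List.range xs.length).filter
          (fun k => (xs ++ [x]).getD k "" == l')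
        = (List.range xs.length).filter (fun k => xs.getD k "" == l') := by
      intro l'
      exact List.filter_congr (fun k hk => by
        rw [List.getD_append _ _ _ _ (List.mem_range.mp hk)])
    have hlast : (xs ++ [x]).getD xs.length "" = x := pv_letterAt_new xs x
    rw [hcong l]
    by_cases hc : (xs.zipIdx.foldl (fun d q => if d.contains q.1 then d else d.insert q.1 q.2)
        (PySem.Dict.empty : PySem.Dict String Nat)).contains x
    · rw [if_pos hc]
      by_cases hl : l = x
      · subst hl
        have hsome : ((xs.zipIdx.foldl (fun d q => if d.contains q.1 then d else d.insert q.1 q.2)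
            (PySem.Dict.empty : PySem.Dict String Nat)).get? l).isSome := by
          cases hget : (xs.zipIdx.foldl (fun d q => if d.contains q.1 then d else d.insert q.1 q.2)
              (PySem.Dict.empty : PySem.Dict String Nat)).get? l with
          | none =>
            have := (PySem.Dict.get?_eq_none_iff_contains _ _).mp hget
            simp [this] at hc
          | some v => rfl
        rw [ih] at hsome
        rw [ih, List.head?_append, Option.or_of_isSome hsome]
      · have : ((xs ++ [x]).getD xs.length "" == l) = false := by
          rw [hlast]; simpa [beq_eq_false_iff_ne] using fun h => hl h.symm
        rw [List.filter_cons, this]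
        simp [ih]
    · rw [if_neg hc]
      have hnone : (xs.zipIdx.foldl (fun d q => if d.contains q.1 then d else d.insert q.1 q.2)
          (PySem.Dict.empty : PySem.Dict String Nat)).get? x = none :=
        (PySem.Dict.get?_eq_none_iff_contains _ _).mpr (by simpa using hc)
      rw [PySem.Dict.get?_insert]
      by_cases hl : l = x
      · subst hl
        have hempty : (List.range xs.length).filter (fun k => xs.getD k "" == l) = [] := by
          rw [← List.head?_eq_none_iff, ← ih]
          exact hnone
        rw [if_pos rfl, hempty, List.filter_cons]
        simp
      · rw [if_neg hl, ih, List.filter_cons]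
        have : ((xs ++ [x]).getD xs.length "" == l) = false := by
          rw [hlast]; simpa [beq_eq_false_iff_ne] using fun h => hl h.symm
        rw [this]
        simp

theorem pvRep_init (row0 : List String) :
    pvRep { letters := row0,
            nxt := (List.range row0.length).tail.map some ++ (if row0.isEmpty then [] else [none]),
            head := if row0.isEmpty then none else some 0,
            first := row0.zipIdx.foldl (fun d q => if d.contains q.1 then d else d.insert q.1 q.2) PySem.Dict.empty }
      (List.range row0.length) row0 := by
  refine ⟨List.nodup_range, fun n hn => List.mem_range.mp hn, ?_, ?_, ?_, pv_init_first row0⟩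
  · -- lengths agree
    cases row0 with
    | nil => simp
    | cons a r => simp [List.tail_range]
  · -- the initial chain 0 → 1 → … → n-1 spells out range n
    have := pv_init_links row0 row0.length 0 (Nat.zero_add _)
    rcases row0 with - | ⟨a, r⟩
    · simpa using this
    · simpa [List.range_eq_range'] using this
  · -- row0 is its own sequence of letters
    apply List.ext_getElem (by simp)
    intro i h1 h2
    simp [List.getD, List.getElem?_eq_getElem h1]

-- ===== VERDICT (by name: the statement is the Claim_ definition above) =====
theorem get_new_alphabet_spec : Claim_equal_get_new_alphabet := by
  intro hint _ hpre
  unfold Spec_get_new_alphabet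
  match hint, hpre with
  | row0 :: rest, _ =>
    unfold get_new_alphabet get_new_alphabet_alt
    rw [PySem.List.pop?_zero_cons]
    simp only
    obtain ⟨ns', hr'⟩ := pv_outer rest _ _ _ (pvRep_init row0)
    rw [pvWalk_links _ _ ns' _ _ hr'.links (pv_len_le ns' _ hr'.nodup hr'.bound),
        ← hr'.alphEq]
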